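-- pv_equiv track=rewrite | github.com/lvcorreia/IST-FP-Buggy-Database | projeto1-ist1103528.py | check_cipher
-- ===== SOURCE A (Python) =====
-- def check_cipher(cipher):
--     prev_char = "dash"
--     for element in cipher:
--         # Check character is a letter
--         if element.isalpha() and element.islower():
--             prev_char = "char"
--         # Check character is a dash
--         elif element == "-" and prev_char != "dash":
--             prev_char = "dash"
--         else:
--             return False
--     # Check if last element is a dash
--     if prev_char == "dash":
--         return False
--     return True
-- ===== SOURCE B (Python) =====
-- def check_cipher(cipher):
--     return all(
--         part != "" and all(c.isalpha() and c.islower() for c in part)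
--         for part in cipher.split("-")
--     )
-- ===== Notes on version B (the rewrite author's own statement) =====
-- stated objective: simpler
-- what changed: Replaces A's char-by-char state machine tracking the previous character with a split-on-dash decomposition that checks every segment is a non-empty run of lowercase letters.
import Mathlib
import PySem

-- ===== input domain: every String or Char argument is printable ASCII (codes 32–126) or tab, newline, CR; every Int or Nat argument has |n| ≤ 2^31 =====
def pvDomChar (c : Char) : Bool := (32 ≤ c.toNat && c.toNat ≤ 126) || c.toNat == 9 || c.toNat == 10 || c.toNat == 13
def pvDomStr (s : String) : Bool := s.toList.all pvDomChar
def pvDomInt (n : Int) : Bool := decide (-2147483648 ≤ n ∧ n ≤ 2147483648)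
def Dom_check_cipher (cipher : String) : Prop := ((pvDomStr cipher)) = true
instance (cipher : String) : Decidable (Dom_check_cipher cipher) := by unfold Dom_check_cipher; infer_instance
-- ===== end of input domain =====

-- B replaces A's char-by-char state machine (tracking the previous character) with a
-- split-on-dash decomposition checking each segment is a non-empty lowercase-letter run (objective: simpler).

-- ===== PORT A =====
-- A's loop with early return, state prev_char ∈ {"dash","char"}; tail check afterwards.
def chkLoopA (l : List Char) (prev : String) : Bool :=
  match l with
  | [] => if prev == "dash" then false else true
  | e :: rest =>
    if PySem.Chars.isalpha e && PySem.Chars.islower e then chkLoopA rest "char"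
    else if e == '-' && prev != "dash" then chkLoopA rest "dash"
    else false

def check_cipher (cipher : String) : Bool := chkLoopA cipher.toList "dash"

-- ===== PORT B =====
def check_cipher_alt (cipher : String) : Bool :=
  ((PySem.Str.split? cipher "-").getD []).all
    (fun part => part != "" &&
      part.toList.all (fun c => PySem.Chars.isalpha c && PySem.Chars.islower c))

-- ===== PRECONDITION & SPEC =====
def Spec_check_cipher (cipher : String) (out : Bool) : Prop := out = check_cipher_alt cipher
instance (cipher : String) (out : Bool) : Decidable (Spec_check_cipher cipher out) := by unfold Spec_check_cipher; infer_instance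

-- ===== CLAIM (what is proved, stated in full; the proofs are below) =====
def Claim_equal_check_cipher : Prop := ∀ (cipher : String), Dom_check_cipher cipher → Spec_check_cipher cipher (check_cipher cipher)

-- ===== LEMMAS AND PROOFS =====

-- a lowercase letter (as Python's per-char test sees it)
def pvGood (c : Char) : Bool := PySem.Chars.isalpha c && PySem.Chars.islower c

-- simple fuel-free split on '-'
def pvSplit (pre : List Char) : List Char → List (List Char)
  | [] => [pre]
  | c :: rest => if c = '-' then pre :: pvSplit [] rest else pvSplit (pre ++ [c]) rest

-- segment validity of a parts list
def pvG (parts : List (List Char)) : Bool :=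
  parts.all (fun p => !p.isEmpty && p.all pvGood)

theorem pvGo_eq (l : List Char) : ∀ (fuel : Nat) (cur : List Char) (acc : List (List Char)),
    l.length ≤ fuel →
    PySem.Chars.splitOn.go ['-'] fuel l cur acc = acc.reverse ++ pvSplit cur.reverse l := by
  induction l with
  | nil =>
    intro fuel cur acc _
    cases fuel <;> simp [PySem.Chars.splitOn.go, pvSplit]
  | cons c rest ih =>
    intro fuel cur acc hf
    cases fuel with
    | zero => simp at hf
    | succ f =>
      simp only [List.length_cons, Nat.succ_le_succ_iff] at hf
      by_cases hc : c = '-'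
      · subst hc
        have hp : List.isPrefixOf ['-'] ('-' :: rest) = true := by
          simp [List.isPrefixOf]
        simp only [PySem.Chars.splitOn.go, hp, if_pos, List.length_cons, List.length_nil,
          List.drop_succ_cons, List.drop_zero]
        rw [ih f [] (cur.reverse :: acc) (by simpa using hf)]
        simp [pvSplit]
      · have hc' : ¬'-' = c := fun h => hc h.symm
        have hp : List.isPrefixOf ['-'] (c :: rest) = false := by
          simp [List.isPrefixOf, hc']
        simp only [PySem.Chars.splitOn.go, hp]
        rw [ih f (c :: cur) acc hf]
        simp [pvSplit, hc]

theorem pvSplitOn_eq (l : List Char) :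
    PySem.Chars.splitOn l ['-'] = pvSplit [] l := by
  have := pvGo_eq l (l.length + 1) [] [] (by omega)
  simpa [PySem.Chars.splitOn] using this

theorem pvBad (l : List Char) : ∀ pre, pre.all pvGood = false → pvG (pvSplit pre l) = false := by
  induction l with
  | nil => intro pre h; simp [pvSplit, pvG, h]
  | cons c rest ih =>
    intro pre h
    by_cases hc : c = '-'
    · simp [pvSplit, hc, pvG, h]
    · simp only [pvSplit, hc, if_false]
      exact ih (pre ++ [c]) (by simp [List.all_append, h])

theorem pvGood_ne_dash (c : Char) (h : pvGood c = true) : ¬ c = '-' := by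
  intro hc; rw [hc] at h; exact absurd h (by decide)

theorem pvMain (l : List Char) :
    (∀ cur : List Char, cur ≠ [] → cur.all pvGood = true →
      chkLoopA l "char" = pvG (pvSplit cur l)) ∧
    chkLoopA l "dash" = pvG (pvSplit [] l) := by
  induction l with
  | nil =>
    constructor
    · intro cur hne hall
      simp [chkLoopA, pvSplit, pvG, hall, hne]
    · simp [chkLoopA, pvSplit, pvG]
  | cons c rest ih =>
    constructor
    · intro cur hne hall
      by_cases hg : pvGood c = true
      · have hc : ¬ c = '-' := pvGood_ne_dash c hg
        have hg' : (PySem.Chars.isalpha c && PySem.Chars.islower c) = true := hg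
        simp only [chkLoopA, hg', if_pos, pvSplit, hc, if_false]
        exact ih.1 (cur ++ [c]) (by simp) (by simp [List.all_append, hall, pvGood] at hg' ⊢; exact hg')
      · have hg' : (PySem.Chars.isalpha c && PySem.Chars.islower c) = false := by
          simpa [pvGood] using hg
        by_cases hc : c = '-'
        · subst hc
          simp only [chkLoopA, hg', Bool.false_eq_true, if_false]
          simp only [show (('-' : Char) == '-' && ("char" : String) != "dash") = true by decide, if_pos]
          rw [ih.2]
          simp [pvSplit, pvG, hall, hne]
        · simp only [chkLoopA, hg', Bool.false_eq_true, if_false]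
          have : (c == '-' && ("char" : String) != "dash") = false := by
            simp [hc]
          simp only [this, Bool.false_eq_true, if_false]
          rw [show pvSplit cur (c :: rest) = pvSplit (cur ++ [c]) rest by simp [pvSplit, hc]]
          rw [pvBad rest (cur ++ [c]) (by simp [List.all_append, pvGood]; intro _; simpa [pvGood] using hg)]
    · by_cases hg : pvGood c = true
      · have hc : ¬ c = '-' := pvGood_ne_dash c hg
        have hg' : (PySem.Chars.isalpha c && PySem.Chars.islower c) = true := hg
        simp only [chkLoopA, hg', if_pos, pvSplit, hc, if_false]
        exact ih.1 [c] (by simp) (by simp [pvGood] at hg' ⊢; exact hg')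
      · have hg' : (PySem.Chars.isalpha c && PySem.Chars.islower c) = false := by
          simpa [pvGood] using hg
        by_cases hc : c = '-'
        · subst hc
          simp only [chkLoopA, hg', Bool.false_eq_true, if_false]
          simp only [show (('-' : Char) == '-' && ("dash" : String) != "dash") = false by decide, Bool.false_eq_true, if_false]
          simp [pvSplit, pvG]
        · simp only [chkLoopA, hg', Bool.false_eq_true, if_false]
          have : (c == '-' && ("dash" : String) != "dash") = false := by
            simp
          simp only [this, Bool.false_eq_true, if_false]
          rw [show pvSplit [] (c :: rest) = pvSplit [c] rest by simp [pvSplit, hc]]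
          rw [pvBad rest [c] (by simpa [pvGood] using hg)]

theorem pvAllMap (X : List (List Char)) :
    (X.map String.ofList).all
      (fun part => part != "" &&
        part.toList.all (fun c => PySem.Chars.isalpha c && PySem.Chars.islower c)) = pvG X := by
  induction X with
  | nil => rfl
  | cons p X ih =>
    simp only [List.map_cons, List.all_cons, pvG, ih]
    have ht : (String.ofList p).toList = p := by simp
    have hne : ((String.ofList p) != "") = !p.isEmpty := by
      rcases p with _ | ⟨c, cs⟩
      · simp
      · simp only [List.isEmpty_cons, Bool.not_false, bne_iff_ne, ne_eq]
        intro h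
        have := congrArg String.toList h
        simp at this
    rw [ht, hne]
    rfl

-- ===== VERDICT (by name: the statement is the Claim_ definition above) =====
theorem check_cipher_spec : Claim_equal_check_cipher := by
  intro cipher _
  unfold Spec_check_cipher check_cipher check_cipher_alt
  rw [(pvMain cipher.toList).2]
  have h1 : PySem.Str.split? cipher "-" =
      some ((pvSplit [] cipher.toList).map String.ofList) := by
    simp [PySem.Str.split?, PySem.Chars.split?, pvSplitOn_eq]
  rw [h1]
  simp only [Option.getD_some]
  rw [pvAllMap]
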